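-- pv_equiv track=rewrite | github.com/rootsec1/mirrormate.ai | server/util.py | explode_game_into_moves
-- ===== SOURCE A (Python) =====
-- def explode_game_into_moves(game: dict, lichess_username: str) -> list[dict]:
--     encoded_moves = []
--
--     white_player = game.get("white_player")
--
--     move_list = game.get("move_list")
--     move_list = move_list.split(" ")
--     move_list_length = len(move_list)
--
--     generator_start_index = 0 if white_player == lichess_username else 1
--
--     for i in range(generator_start_index, move_list_length, 2):
--         if i == 0:
--             input_sequence = None
--         else:
--             input_sequence = " ".join(move_list[:i])
--         # The target move is the next move in the sequence
--         target_move = move_list[i]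
--         encoded_moves.append((input_sequence, target_move))
--
--     return encoded_moves
-- ===== SOURCE B (Python) =====
-- def explode_game_into_moves(game: dict, lichess_username: str) -> list[dict]:
--     move_list = game.get("move_list").split(" ")
--     parity = 0 if game.get("white_player") == lichess_username else 1
--     encoded_moves = []
--     seen = []
--     for j, move in enumerate(move_list):
--         if j % 2 == parity:
--             encoded_moves.append((" ".join(seen) if seen else None, move))
--         seen.append(move)
--     return encoded_moves
-- ===== Notes on version B (the rewrite author's own statement) =====
-- stated objective: alternative
-- what changed: Replaces the stride-2 index loop with repeated move_list[:i] slicing and re-joining by a single enumerate pass that keeps a running accumulator of the moves seen so far, emitting a pair whenever the index has the player's parity.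
import Mathlib
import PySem

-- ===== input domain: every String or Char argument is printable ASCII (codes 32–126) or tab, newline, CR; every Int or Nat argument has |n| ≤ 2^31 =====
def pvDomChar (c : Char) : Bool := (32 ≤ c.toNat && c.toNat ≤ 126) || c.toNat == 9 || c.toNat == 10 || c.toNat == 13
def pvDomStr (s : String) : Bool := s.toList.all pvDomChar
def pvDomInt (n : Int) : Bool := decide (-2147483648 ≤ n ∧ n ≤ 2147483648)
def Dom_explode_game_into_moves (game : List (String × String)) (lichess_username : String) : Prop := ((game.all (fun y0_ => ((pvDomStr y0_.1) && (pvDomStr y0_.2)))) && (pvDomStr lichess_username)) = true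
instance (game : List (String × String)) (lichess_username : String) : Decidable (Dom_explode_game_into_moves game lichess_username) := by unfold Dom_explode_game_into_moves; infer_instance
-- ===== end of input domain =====

-- B replaces A's stride-2 index loop with repeated move_list[:i] slicing and re-joining by one
-- enumerate pass over all moves that keeps a running accumulator of the moves seen so far
-- (alternative decomposition, same result and similar cost).

-- ===== PORT A =====
-- the (input_sequence, target_move) pair A's loop body appends at index i
def aPair (ms : List String) (i : Int) : Option String × String :=
  ((if i = 0 then none else some (PySem.Str.join " " (PySem.List.slice ms none (some i)))),
   PySem.List.pyGetD ms i "")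

def explode_game_into_moves (game : List (String × String)) (lichess_username : String) : List (Option String × String) :=
  match game.lookup "move_list" with
  | none => []   -- unreachable under Pre_: Python raises AttributeError (None.split) here
  | some ml =>
    -- the separator is the nonempty literal " ", so split? is always some
    let move_list := (PySem.Str.split? ml " ").getD []
    let move_list_length : Int := move_list.length
    let generator_start_index : Int := if game.lookup "white_player" = some lichess_username then 0 else 1
    (PySem.List.pyRange generator_start_index move_list_length 2).foldl
      (fun acc i => acc ++ [aPair move_list i]) []

-- ===== PORT B =====
-- one forward pass: j = current index, seen = moves seen so far, acc = output so far
def bLoop (parity : Nat) : List String → Nat → List String → List (Option String × String) → List (Option String × String)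
  | [], _, _, acc => acc
  | m :: rest, j, seen, acc =>
      bLoop parity rest (j + 1) (seen ++ [m])
        (if j % 2 = parity then
           acc ++ [((if seen = [] then none else some (PySem.Str.join " " seen)), m)]
         else acc)

def explode_game_into_moves_alt (game : List (String × String)) (lichess_username : String) : List (Option String × String) :=
  match game.lookup "move_list" with
  | none => []   -- unreachable under Pre_: Python raises AttributeError here too
  | some ml =>
    let move_list := (PySem.Str.split? ml " ").getD []
    let parity : Nat := if game.lookup "white_player" = some lichess_username then 0 else 1
    bLoop parity move_list 0 [] []

-- ===== PRECONDITION & SPEC =====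
-- A (and B) raise AttributeError (None.split) when the "move_list" key is absent; only those inputs are excluded.
def Pre_explode_game_into_moves (game : List (String × String)) (_lichess_username : String) : Prop :=
  (game.lookup "move_list").isSome = true
instance (game : List (String × String)) (lichess_username : String) : Decidable (Pre_explode_game_into_moves game lichess_username) := by unfold Pre_explode_game_into_moves; infer_instance

def pvWitness_explode_game_into_moves : (List (String × String)) × String :=
  ([("white_player", "alice"), ("move_list", "e4 e5 Nf3 Nc6")], "alice")

def Spec_explode_game_into_moves (game : List (String × String)) (lichess_username : String) (out : List (Option String × String)) : Prop := out = explode_game_into_moves_alt game lichess_username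
instance (game : List (String × String)) (lichess_username : String) (out : List (Option String × String)) : Decidable (Spec_explode_game_into_moves game lichess_username out) := by unfold Spec_explode_game_into_moves; infer_instance

-- ===== CLAIM (what is proved, stated in full; the proofs are below) =====
def Claim_equal_explode_game_into_moves : Prop := ∀ (game : List (String × String)) (lichess_username : String), Dom_explode_game_into_moves game lichess_username → Pre_explode_game_into_moves game lichess_username → Spec_explode_game_into_moves game lichess_username (explode_game_into_moves game lichess_username)

-- ===== LEMMAS AND PROOFS =====
theorem pyRange_two_cons (a b : Int) (h : a < b) : PySem.List.pyRange a b 2 = a :: PySem.List.pyRange (a + 2) b 2 := by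
  rw [PySem.List.pyRange_of_pos a b (by norm_num), PySem.List.pyRange_of_pos (a+2) b (by norm_num)]
  by_cases h2 : a + 2 < b
  · rw [if_pos h, if_pos h2, show ((b - a + 2 - 1)/2).toNat = ((b-(a+2)+2-1)/2).toNat + 1 by omega,
      List.range_succ_eq_map]
    simp [List.map_map]
    intro k _; ring
  · rw [if_pos h, if_neg h2, show ((b - a + 2 - 1)/2).toNat = 1 by omega]
    simp [List.range_succ]
theorem pyRange_two_nil (a b : Int) (h : b ≤ a) : PySem.List.pyRange a b 2 = [] := by
  rw [PySem.List.pyRange_of_pos a b (by norm_num)]; simp [show ¬ a < b by omega]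

theorem bLoop_eq_foldl (parity : Nat) (hp : parity < 2) (ms : List String) :
    ∀ (rest : List String) (j : Nat) (acc : List (Option String × String)),
      ms.drop j = rest →
      bLoop parity rest j (ms.take j) acc
        = (PySem.List.pyRange (if j % 2 = parity then (j : Int) else (j : Int) + 1) (ms.length : Int) 2).foldl
            (fun acc i => acc ++ [aPair ms i]) acc := by
  intro rest
  induction rest with
  | nil =>
    intro j acc hdrop
    have hj : ms.length ≤ j := by
      have := congrArg List.length hdrop; simp at this; omega
    rw [bLoop, pyRange_two_nil _ _ (by split <;> omega)]
    rfl
  | cons m rest ih =>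
    intro j acc hdrop
    have hj : j < ms.length := by
      have := congrArg List.length hdrop; simp at this; omega
    have hms : ms[j]'hj = m := by
      have h0 : (ms.drop j)[0]'(by simp [hdrop]) = m := by simp [hdrop]
      simpa using h0
    have hdrop' : ms.drop (j + 1) = rest := by
      rw [← List.drop_drop, hdrop]; rfl
    have htake : ms.take j ++ [m] = ms.take (j + 1) := by
      rw [List.take_add_one]
      simp [List.getElem?_eq_getElem hj, hms]
    rw [bLoop, htake, ih (j + 1) _ hdrop']
    have hseen : (ms.take j = []) ↔ j = 0 := by
      constructor
      · intro h
        rcases List.take_eq_nil_iff.mp h with h' | h'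
        · exact h'
        · subst h'; simp at hj
      · intro h; simp [h]
    by_cases hpar : j % 2 = parity
    · have hpar' : ¬ (j + 1) % 2 = parity := by omega
      rw [if_pos hpar, if_pos hpar, if_neg hpar']
      push_cast
      rw [pyRange_two_cons (j : Int) (ms.length : Int) (by exact_mod_cast hj), List.foldl_cons]
      have hpair : ((if ms.take j = [] then none else some (PySem.Str.join " " (ms.take j))), m)
          = aPair ms (j : Int) := by
        unfold aPair
        rw [PySem.List.slice_to_natCast, PySem.List.pyGetD_natCast]
        have hgd : ms.getD j "" = m := by
          simp [List.getD, List.getElem?_eq_getElem hj, hms]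
        rw [hgd]
        by_cases hz : j = 0
        · simp [hz]
        · simp [hseen, hz, Int.natCast_eq_zero]
      rw [hpair, show ((j : Nat) : Int) + 1 + 1 = ((j : Nat) : Int) + 2 by ring]
    · have hpar' : (j + 1) % 2 = parity := by omega
      rw [if_neg hpar, if_neg hpar, if_pos hpar']
      push_cast
      rfl

-- top-level: for either parity the two loop shapes agree
theorem explode_eq (game : List (String × String)) (u : String)
    (hpre : (game.lookup "move_list").isSome = true) :
    explode_game_into_moves game u = explode_game_into_moves_alt game u := by
  unfold explode_game_into_moves explode_game_into_moves_alt
  cases hml : game.lookup "move_list" with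
  | none => simp [hml] at hpre
  | some ml =>
    simp only
    set ms := (PySem.Str.split? ml " ").getD [] with hms
    by_cases hw : game.lookup "white_player" = some u
    · rw [if_pos hw, if_pos hw]
      have h := bLoop_eq_foldl 0 (by omega) ms ms 0 [] (by rfl)
      simp only [List.take_zero, Nat.zero_mod, Nat.cast_zero] at h
      exact h.symm
    · rw [if_neg hw, if_neg hw]
      have h := bLoop_eq_foldl 1 (by omega) ms ms 0 [] (by rfl)
      simp only [List.take_zero, Nat.zero_mod, Nat.cast_zero] at h
      rw [if_neg (by omega : ¬ (0 : Nat) % 2 = 1)] at h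
      norm_num at h ⊢
      exact h.symm

-- ===== VERDICT (by name: the statement is the Claim_ definition above) =====
theorem explode_game_into_moves_spec : Claim_equal_explode_game_into_moves := by
  intro game u _ hpre
  exact explode_eq game u hpre
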